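-- pv_equiv track=rewrite | github.com/AleYepes/pystocks | analysis.py | merge_drop_map
-- ===== SOURCE A (Python) =====
-- def merge_drop_map(drop_map):
--     cols_to_drop = set(col for drops in drop_map.values() for col in drops)
--     final_drop_map = {}
--     for keeper, direct_drops in drop_map.items():
--         if keeper not in cols_to_drop:
--             cols_to_check = list(direct_drops)
--             all_related_drops = set(direct_drops)
--             while cols_to_check:
--                 col = cols_to_check.pop(0)
--                 if col in drop_map:
--                     new_drops = [d for d in drop_map[col] if d not in all_related_drops]
--                     cols_to_check.extend(new_drops)
--                     all_related_drops.update(new_drops)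
--
--             final_drop_map[keeper] = sorted(list(all_related_drops))
--
--     return final_drop_map
-- ===== SOURCE B (Python) =====
-- def merge_drop_map(drop_map):
--     dropped = {c for ds in drop_map.values() for c in ds}
--
--     def collect(col, seen):
--         for d in drop_map.get(col, []):
--             if d not in seen:
--                 seen.add(d)
--                 collect(d, seen)
--
--     def closure(direct):
--         seen = set()
--         for d in direct:
--             if d not in seen:
--                 seen.add(d)
--                 collect(d, seen)
--         return seen
--
--     return {keeper: sorted(closure(direct))
--             for keeper, direct in drop_map.items()
--             if keeper not in dropped}
-- ===== Notes on version B (the rewrite author's own statement) =====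
-- stated objective: alternative
-- what changed: Replaces A's iterative FIFO worklist (pop(0), batch list-comprehension filter, extend, set.update, dict built by insertion in a loop) with a recursive depth-first collect(col, seen) helper that tests and adds one successor at a time, a closure seeded from an empty set, and a dict comprehension with a filter instead of the guarded insertion loop.
import Mathlib
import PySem

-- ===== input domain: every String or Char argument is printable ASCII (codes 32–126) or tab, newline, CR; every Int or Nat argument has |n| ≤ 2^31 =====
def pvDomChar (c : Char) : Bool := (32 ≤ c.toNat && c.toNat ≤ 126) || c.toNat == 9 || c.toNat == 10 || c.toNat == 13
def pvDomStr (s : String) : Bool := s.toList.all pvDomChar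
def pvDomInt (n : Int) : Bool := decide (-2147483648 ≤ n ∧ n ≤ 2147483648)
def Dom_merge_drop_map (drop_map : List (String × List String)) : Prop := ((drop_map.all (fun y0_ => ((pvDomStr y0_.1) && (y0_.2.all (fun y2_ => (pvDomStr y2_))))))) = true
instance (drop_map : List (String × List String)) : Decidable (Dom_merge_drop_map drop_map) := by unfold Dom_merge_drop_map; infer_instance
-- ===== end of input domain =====

-- B replaces A's iterative FIFO worklist and guarded dict-insertion loop by a recursive
-- depth-first collect(col, seen) helper (one successor tested/added at a time, seeded from an
-- empty set) and a dict comprehension (filter + map over the items); same returned dict.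
-- The recursive loop ports carry a fuel counter as a pure totality guard (never exhausted
-- when called from the entry points).

-- ===== PORT A =====
-- the while-loop of A: FIFO queue popped at the front, batch filter / extend / update per column
def bfsA (dm : PySem.Dict String (List String)) : Nat → List String → PySem.Set String →
    PySem.Set String
  | _, [], s => s
  | 0, _ :: _, s => s  -- fuel guard, never reached from merge_drop_map
  | fuel + 1, col :: rest, s =>
    if dm.contains col then
      let new_drops := (dm.getD col []).filter (fun d => !(PySem.Set.contains s d))
      bfsA dm fuel (rest ++ new_drops) (PySem.Set.update s new_drops)
    else
      bfsA dm fuel rest s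

def merge_drop_map (drop_map : List (String × List String)) : List (String × List String) :=
  let dm := PySem.Dict.ofList drop_map
  let cols_to_drop := PySem.Set.ofList dm.values.flatten
  (dm.items.foldl
    (fun fd p =>
      if PySem.Set.contains cols_to_drop p.1 then fd
      else fd.insert p.1
        (PySem.List.sorted
          (bfsA dm
            (p.2.length + (dm.values.flatten.length + 1) * (dm.values.flatten.length + 1))
            p.2 (PySem.Set.ofList p.2))
          (fun x => x)))
    PySem.Dict.empty).items

-- ===== PORT B =====
-- B's recursive helper: collect(col, seen) walks drop_map[col], adding each unseen successor
-- and recursing into it immediately (depth-first)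
def collectB (dm : PySem.Dict String (List String)) : Nat → String → PySem.Set String →
    PySem.Set String
  | 0, _, seen => seen  -- fuel guard, never reached from merge_drop_map_alt
  | f + 1, col, seen =>
      (dm.getD col []).foldl
        (fun s d => if PySem.Set.contains s d then s else collectB dm f d (PySem.Set.add s d))
        seen

-- the body of B's 'if d not in seen: seen.add(d); collect(d, seen)' (also the step of closure's loop)
def stepB (dm : PySem.Dict String (List String)) (f : Nat) (s : PySem.Set String) (d : String) :
    PySem.Set String :=
  if PySem.Set.contains s d then s else collectB dm f d (PySem.Set.add s d)

-- B's closure(direct): seed an empty set, visit each direct drop depth-first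
def closureB (dm : PySem.Dict String (List String)) (direct : List String) : PySem.Set String :=
  direct.foldl (stepB dm (dm.values.flatten.length + 1)) PySem.Set.empty

def merge_drop_map_alt (drop_map : List (String × List String)) : List (String × List String) :=
  let dm := PySem.Dict.ofList drop_map
  let dropped := PySem.Set.ofList dm.values.flatten
  (dm.items.filter (fun p => !(PySem.Set.contains dropped p.1))).map
    (fun p => (p.1, PySem.List.sorted (closureB dm p.2) (fun x => x)))

-- ===== PRECONDITION & SPEC =====
def Spec_merge_drop_map (drop_map : List (String × List String)) (out : List (String × List String)) : Prop := out = merge_drop_map_alt drop_map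
instance (drop_map : List (String × List String)) (out : List (String × List String)) : Decidable (Spec_merge_drop_map drop_map out) := by unfold Spec_merge_drop_map; infer_instance

-- ===== CLAIM (what is proved, stated in full; the proofs are below) =====
def Claim_equal_merge_drop_map : Prop := ∀ (drop_map : List (String × List String)), Dom_merge_drop_map drop_map → Spec_merge_drop_map drop_map (merge_drop_map drop_map)

-- ===== LEMMAS AND PROOFS =====

theorem collectB_succ (dm : PySem.Dict String (List String)) (f : Nat) (col : String)
    (seen : PySem.Set String) :
    collectB dm (f + 1) col seen = (dm.getD col []).foldl (stepB dm f) seen := rfl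

-- the distinct strings occurring in dm's value lists, and how many of them a set s is still missing
def pvUniv (dm : PySem.Dict String (List String)) : List String :=
  PySem.Set.ofList dm.values.flatten

def pvCnt (dm : PySem.Dict String (List String)) (s : PySem.Set String) : Nat :=
  ((pvUniv dm).filter (fun x => !(PySem.Set.contains s x))).length

def pvClosed (dm : PySem.Dict String (List String)) (S : List String) : Prop :=
  ∀ c ∈ S, ∀ d ∈ dm.getD c [], d ∈ S

theorem pv_filter_len_le {α : Type} (l : List α) (p q : α → Bool)
    (h : ∀ x ∈ l, q x = true → p x = true) :
    (l.filter q).length ≤ (l.filter p).length := by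
  induction l with
  | nil => simp
  | cons a t ih =>
    have ht : ∀ x ∈ t, q x = true → p x = true := fun x hx => h x (by simp [hx])
    have iht := ih ht
    rcases hq : q a with _ | _ <;> rcases hp : p a with _ | _ <;>
      simp [hq, hp] <;>
      first
        | omega
        | (exact absurd (h a (by simp) hq) (by simp [hp]))

theorem pv_getD_sub_univ (dm : PySem.Dict String (List String)) (c x : String)
    (hx : x ∈ dm.getD c []) : x ∈ pvUniv dm := by
  rw [pvUniv, PySem.Set.mem_ofList, List.mem_flatten]
  rcases hv : dm.get? c with _ | v
  · rw [PySem.Dict.getD_eq_get?_getD, hv] at hx; simp at hx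
  · refine ⟨v, ?_, ?_⟩
    · have := PySem.Dict.mem_items_of_get?_eq_some (d := dm) hv
      simpa [PySem.Dict.values] using ⟨c, this⟩
    · rwa [PySem.Dict.getD_eq_get?_getD, hv] at hx

theorem pv_cnt_mono (dm : PySem.Dict String (List String)) (s s' : PySem.Set String)
    (h : ∀ y ∈ s, y ∈ s') : pvCnt dm s' ≤ pvCnt dm s := by
  apply pv_filter_len_le
  intro x _ hq
  simp only [Bool.not_eq_true', ← Bool.not_eq_true, PySem.Set.contains_iff] at hq ⊢
  exact fun hs => hq (h x hs)

theorem pv_filter_len_lt {α : Type} (l : List α) (p q : α → Bool) (x : α)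
    (h : ∀ y ∈ l, q y = true → p y = true) (hx : x ∈ l) (hpx : p x = true) (hqx : q x = false) :
    (l.filter q).length < (l.filter p).length := by
  induction l with
  | nil => simp at hx
  | cons a t ih =>
    have ht : ∀ y ∈ t, q y = true → p y = true := fun y hy => h y (by simp [hy])
    have hle := pv_filter_len_le t p q ht
    rcases List.mem_cons.mp hx with rfl | hxt
    · simp [hqx, hpx]
      omega
    · have ihl := ih ht hxt
      rcases hq : q a with _ | _ <;> rcases hp : p a with _ | _ <;>
        simp [hq, hp] <;>
        first
          | omega
          | (exact absurd (h a (by simp) hq) (by simp [hp]))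

theorem pv_cnt_add_lt (dm : PySem.Dict String (List String)) (s : PySem.Set String) (x : String)
    (hu : x ∈ pvUniv dm) (hns : x ∉ s) : pvCnt dm (s.add x) < pvCnt dm s := by
  apply pv_filter_len_lt _ _ _ x
  · intro y _ hq
    simp only [Bool.not_eq_true', ← Bool.not_eq_true, PySem.Set.contains_iff] at hq ⊢
    intro hy
    exact hq ((PySem.Set.mem_add s x y).mpr (Or.inl hy))
  · exact hu
  · simp [hns]
  · simp [PySem.Set.mem_add]

theorem pv_cnt_pos (dm : PySem.Dict String (List String)) (s : PySem.Set String) (d : String)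
    (hd : d ∈ pvUniv dm) (hns : d ∉ s) : 0 < pvCnt dm s :=
  List.length_pos_of_mem
    (List.mem_filter.mpr ⟨hd, by simp [hns]⟩)

theorem pv_cnt_update_lt (dm : PySem.Dict String (List String)) (s : PySem.Set String)
    (x : String) (t : List String)
    (hu : ∀ y ∈ x :: t, y ∈ pvUniv dm) (hns : ∀ y ∈ x :: t, y ∉ s) :
    pvCnt dm (PySem.Set.update s (x :: t)) < pvCnt dm s := by
  have h1 : ∀ y ∈ s.add x, y ∈ PySem.Set.update s (x :: t) := by
    intro y hy
    rcases (PySem.Set.mem_add s x y).mp hy with hy | rfl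
    · exact (PySem.Set.mem_update s _ y).mpr (Or.inl hy)
    · exact (PySem.Set.mem_update s _ y).mpr (Or.inr (by simp))
  calc pvCnt dm (PySem.Set.update s (x :: t)) ≤ pvCnt dm (s.add x) := pv_cnt_mono _ _ _ h1
    _ < pvCnt dm s := pv_cnt_add_lt dm s x (hu x (by simp)) (hns x (by simp))

theorem pv_len_le_flatten {α : Type} (v : List α) (L : List (List α)) (h : v ∈ L) :
    v.length ≤ L.flatten.length := by
  induction L with
  | nil => simp at h
  | cons a t ih =>
    rcases List.mem_cons.mp h with rfl | h
    · simp
    · have := ih h; simp at this ⊢; omega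

theorem pv_getD_len_le (dm : PySem.Dict String (List String)) (c : String) :
    (dm.getD c []).length ≤ dm.values.flatten.length := by
  rcases hv : dm.get? c with _ | v
  · rw [PySem.Dict.getD_eq_get?_getD, hv]; simp
  · rw [PySem.Dict.getD_eq_get?_getD, hv]
    have hmem : v ∈ dm.values := by
      have := PySem.Dict.mem_items_of_get?_eq_some (d := dm) hv
      simpa [PySem.Dict.values] using ⟨c, this⟩
    simpa using pv_len_le_flatten v dm.values hmem

theorem pvCnt_le (dm : PySem.Dict String (List String)) (s : PySem.Set String) :
    pvCnt dm s ≤ dm.values.flatten.length :=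
  le_trans (List.length_filter_le _ _) (PySem.Set.length_ofList_le dm.values.flatten)

-- ----- A-side: properties of the BFS worklist loop -----

theorem pvA_dec (dm : PySem.Dict String (List String)) (s : PySem.Set String)
    (col : String) (rest : List String) :
    (rest ++ (dm.getD col []).filter (fun d => !(PySem.Set.contains s d))).length +
      (dm.values.flatten.length + 1) *
        pvCnt dm (PySem.Set.update s
          ((dm.getD col []).filter (fun d => !(PySem.Set.contains s d)))) <
    (col :: rest).length + (dm.values.flatten.length + 1) * pvCnt dm s := by
  rcases hnd : (dm.getD col []).filter (fun d => !(PySem.Set.contains s d)) with _ | ⟨x, t⟩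
  · simp [PySem.Set.update]
  · have hlt : pvCnt dm (PySem.Set.update s (x :: t)) < pvCnt dm s := by
      apply pv_cnt_update_lt
      · intro y hy
        rw [← hnd] at hy
        exact pv_getD_sub_univ dm col y (List.mem_of_mem_filter hy)
      · intro y hy
        rw [← hnd] at hy
        have := List.of_mem_filter hy
        simpa [PySem.Set.contains_iff] using this
    have hlen : (x :: t).length ≤ dm.values.flatten.length := by
      rw [← hnd]
      exact le_trans (List.length_filter_le _ _) (pv_getD_len_le dm col)
    simp only [List.length_append, List.length_cons] at hlen ⊢
    nlinarith [hlt, hlen]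

theorem bfsA_mono (dm : PySem.Dict String (List String)) (fuel : Nat) (queue : List String)
    (s : PySem.Set String) (x : String) (hx : x ∈ s) : x ∈ bfsA dm fuel queue s := by
  fun_induction bfsA dm fuel queue s with
  | case1 => exact hx
  | case2 => exact hx
  | case3 fuel col rest s hcon new ih =>
    exact ih ((PySem.Set.mem_update s new x).mpr (Or.inl hx))
  | case4 fuel col rest s hcon ih => exact ih hx

theorem bfsA_sub (dm : PySem.Dict String (List String)) (fuel : Nat) (queue : List String)
    (s : PySem.Set String) (T : List String) (hT : pvClosed dm T) :
    (∀ y ∈ s, y ∈ T) → (∀ y ∈ queue, y ∈ T) → ∀ x ∈ bfsA dm fuel queue s, x ∈ T := by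
  fun_induction bfsA dm fuel queue s with
  | case1 s => exact fun hs _ x hx => hs x hx
  | case2 => exact fun hs _ x hx => hs x hx
  | case3 fuel col rest s hcon new ih =>
    intro hs hq
    apply ih
    · intro y hy
      rcases (PySem.Set.mem_update s new y).mp hy with hy | hy
      · exact hs y hy
      · exact hT col (hq col (by simp)) y (List.mem_of_mem_filter hy)
    · intro y hy
      rcases List.mem_append.mp hy with hy | hy
      · exact hq y (by simp [hy])
      · exact hT col (hq col (by simp)) y (List.mem_of_mem_filter hy)
  | case4 fuel col rest s hcon ih =>
    intro hs hq
    exact ih hs (fun y hy => hq y (by simp [hy]))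

theorem bfsA_closed (dm : PySem.Dict String (List String)) (fuel : Nat) (queue : List String)
    (s : PySem.Set String) :
    queue.length + (dm.values.flatten.length + 1) * pvCnt dm s ≤ fuel →
    (∀ c ∈ s, c ∉ queue → ∀ d ∈ dm.getD c [], d ∈ s) →
    pvClosed dm (bfsA dm fuel queue s) := by
  fun_induction bfsA dm fuel queue s with
  | case1 s =>
    intro _ h c hc d hd
    exact h c hc (by simp) d hd
  | case2 col rest s =>
    intro hfuel
    simp at hfuel
  | case3 fuel col rest s hcon new ih =>
    intro hfuel h
    apply ih
    · have := pvA_dec dm s col rest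
      simp only [new] at *
      omega
    · intro c hc hcq d hd
      have hcs : c ∈ s := by
        rcases (PySem.Set.mem_update s new c).mp hc with hy | hy
        · exact hy
        · exact absurd (List.mem_append.mpr (Or.inr hy)) hcq
      by_cases hccol : c = col
      · subst hccol
        by_cases hds : d ∈ s
        · exact (PySem.Set.mem_update s new d).mpr (Or.inl hds)
        · have : d ∈ new := List.mem_filter.mpr
            ⟨hd, by simp [hds]⟩
          exact (PySem.Set.mem_update s new d).mpr (Or.inr this)
      · have hnq : c ∉ col :: rest := by
          intro hmem
          rcases List.mem_cons.mp hmem with h1 | h1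
          · exact hccol h1
          · exact hcq (List.mem_append.mpr (Or.inl h1))
        exact (PySem.Set.mem_update s new d).mpr (Or.inl (h c hcs hnq d hd))
  | case4 fuel col rest s hcon ih =>
    intro hfuel h
    apply ih
    · simp only [List.length_cons] at hfuel
      omega
    · intro c hc hcq d hd
      by_cases hccol : c = col
      · subst hccol
        have : dm.getD c [] = [] := by
          apply PySem.Dict.getD_of_not_contains
          simpa using hcon
        rw [this] at hd
        simp at hd
      · refine h c hc ?_ d hd
        intro hmem
        rcases List.mem_cons.mp hmem with h1 | h1
        · exact hccol h1
        · exact hcq h1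

theorem bfsA_nodup (dm : PySem.Dict String (List String)) (fuel : Nat) (queue : List String)
    (s : PySem.Set String) (h : s.Nodup) : (bfsA dm fuel queue s).Nodup := by
  fun_induction bfsA dm fuel queue s with
  | case1 s => exact h
  | case2 => exact h
  | case3 fuel col rest s hcon new ih => exact ih (PySem.Set.nodup_update s new h)
  | case4 fuel col rest s hcon ih => exact ih h

-- ----- B-side: properties of the depth-first collect / closure -----

theorem foldB_mono (dm : PySem.Dict String (List String)) :
    ∀ (f : Nat) (l : List String) (s : PySem.Set String) (x : String),
    x ∈ s → x ∈ l.foldl (stepB dm f) s := by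
  intro f
  induction f with
  | zero =>
    intro l
    induction l with
    | nil => exact fun s x hx => hx
    | cons d t ih =>
      intro s x hx
      simp only [List.foldl_cons, stepB]
      by_cases h : PySem.Set.contains s d = true
      · rw [if_pos h]; exact ih s x hx
      · rw [if_neg h]
        have h0 : collectB dm 0 d (PySem.Set.add s d) = PySem.Set.add s d := rfl
        rw [h0]
        exact ih _ x ((PySem.Set.mem_add s d x).mpr (Or.inl hx))
  | succ g ihf =>
    intro l
    induction l with
    | nil => exact fun s x hx => hx
    | cons d t ih =>
      intro s x hx
      simp only [List.foldl_cons, stepB]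
      by_cases h : PySem.Set.contains s d = true
      · rw [if_pos h]; exact ih s x hx
      · rw [if_neg h, collectB_succ]
        exact ih _ x (ihf _ _ x ((PySem.Set.mem_add s d x).mpr (Or.inl hx)))

theorem collectB_mono (dm : PySem.Dict String (List String)) (f : Nat) (col : String)
    (seen : PySem.Set String) (x : String) (hx : x ∈ seen) : x ∈ collectB dm f col seen := by
  cases f with
  | zero => exact hx
  | succ g => rw [collectB_succ]; exact foldB_mono dm g _ _ x hx

theorem foldB_seed (dm : PySem.Dict String (List String)) (f : Nat) :
    ∀ (l : List String) (s : PySem.Set String) (d : String),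
    d ∈ l → d ∈ l.foldl (stepB dm f) s := by
  intro l
  induction l with
  | nil => intro s d hd; simp at hd
  | cons a t ih =>
    intro s d hd
    simp only [List.foldl_cons]
    rcases List.mem_cons.mp hd with rfl | hdt
    · apply foldB_mono dm f t
      simp only [stepB]
      by_cases h : PySem.Set.contains s d = true
      · rw [if_pos h]; exact (PySem.Set.contains_iff s d).mp h
      · rw [if_neg h]
        exact collectB_mono dm f d _ d ((PySem.Set.mem_add s d d).mpr (Or.inr rfl))
    · exact ih _ d hdt

theorem foldB_sub (dm : PySem.Dict String (List String)) (T : List String)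
    (hT : pvClosed dm T) :
    ∀ (f : Nat) (l : List String) (s : PySem.Set String),
    (∀ d ∈ l, d ∈ T) → (∀ y ∈ s, y ∈ T) → ∀ x ∈ l.foldl (stepB dm f) s, x ∈ T := by
  intro f
  induction f with
  | zero =>
    intro l
    induction l with
    | nil => exact fun s _ hs x hx => hs x hx
    | cons d t ih =>
      intro s hl hs x hx
      simp only [List.foldl_cons] at hx
      refine ih _ (fun y hy => hl y (by simp [hy])) ?_ x hx
      intro y hy
      simp only [stepB] at hy
      by_cases h : PySem.Set.contains s d = true
      · rw [if_pos h] at hy; exact hs y hy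
      · rw [if_neg h] at hy
        have h0 : collectB dm 0 d (PySem.Set.add s d) = PySem.Set.add s d := rfl
        rw [h0] at hy
        rcases (PySem.Set.mem_add s d y).mp hy with hy | rfl
        · exact hs y hy
        · exact hl y (by simp)
  | succ g ihf =>
    intro l
    induction l with
    | nil => exact fun s _ hs x hx => hs x hx
    | cons d t ih =>
      intro s hl hs x hx
      simp only [List.foldl_cons] at hx
      refine ih _ (fun y hy => hl y (by simp [hy])) ?_ x hx
      intro y hy
      simp only [stepB] at hy
      by_cases h : PySem.Set.contains s d = true
      · rw [if_pos h] at hy; exact hs y hy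
      · rw [if_neg h, collectB_succ] at hy
        refine ihf (dm.getD d []) (PySem.Set.add s d) ?_ ?_ y hy
        · exact hT d (hl d (by simp))
        · intro z hz
          rcases (PySem.Set.mem_add s d z).mp hz with hz | rfl
          · exact hs z hz
          · exact hl z (by simp)

theorem foldB_nodup (dm : PySem.Dict String (List String)) :
    ∀ (f : Nat) (l : List String) (s : PySem.Set String),
    s.Nodup → (l.foldl (stepB dm f) s).Nodup := by
  intro f
  induction f with
  | zero =>
    intro l
    induction l with
    | nil => exact fun s hs => hs
    | cons d t ih =>
      intro s hs
      simp only [List.foldl_cons]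
      apply ih
      simp only [stepB]
      by_cases h : PySem.Set.contains s d = true
      · rw [if_pos h]; exact hs
      · rw [if_neg h]
        have h0 : collectB dm 0 d (PySem.Set.add s d) = PySem.Set.add s d := rfl
        rw [h0]
        exact PySem.Set.nodup_add s d hs
  | succ g ihf =>
    intro l
    induction l with
    | nil => exact fun s hs => hs
    | cons d t ih =>
      intro s hs
      simp only [List.foldl_cons]
      apply ih
      simp only [stepB]
      by_cases h : PySem.Set.contains s d = true
      · rw [if_pos h]; exact hs
      · rw [if_neg h, collectB_succ]
        exact ihf _ _ (PySem.Set.nodup_add s d hs)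

-- every element ever added by B's depth-first walk is expanded: its successors end in the result
theorem foldB_closed (dm : PySem.Dict String (List String)) :
    ∀ (f : Nat) (l : List String) (s : PySem.Set String),
    (∀ d ∈ l, d ∈ pvUniv dm) → pvCnt dm s ≤ f →
    ∀ x ∈ l.foldl (stepB dm f) s, x ∉ s → ∀ e ∈ dm.getD x [], e ∈ l.foldl (stepB dm f) s := by
  intro f
  induction f using Nat.strong_induction_on with
  | _ f ihf =>
    intro l
    induction l with
    | nil =>
      intro s _ _ x hx hxs
      exact absurd hx hxs
    | cons d t ihl =>
      intro s hl hcnt x hx hxs e he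
      simp only [List.foldl_cons] at hx ⊢
      by_cases hc : PySem.Set.contains s d = true
      · rw [stepB, if_pos hc] at hx ⊢
        exact ihl s (fun y hy => hl y (by simp [hy])) hcnt x hx hxs e he
      · have hdu : d ∈ pvUniv dm := hl d (by simp)
        have hds : d ∉ s := fun hmem => hc ((PySem.Set.contains_iff s d).mpr hmem)
        have hpos : 0 < pvCnt dm s := pv_cnt_pos dm s d hdu hds
        obtain ⟨g, rfl⟩ : ∃ g, f = g + 1 := ⟨f - 1, by omega⟩
        rw [stepB, if_neg hc, collectB_succ] at hx ⊢
        have hcnt' : pvCnt dm (PySem.Set.add s d) ≤ g := by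
          have := pv_cnt_add_lt dm s d hdu hds; omega
        have ht0sub : ∀ y ∈ PySem.Set.add s d,
            y ∈ (dm.getD d []).foldl (stepB dm g) (PySem.Set.add s d) :=
          fun y hy => foldB_mono dm g _ _ y hy
        by_cases hxt0 : x ∈ (dm.getD d []).foldl (stepB dm g) (PySem.Set.add s d)
        · have hsucc : ∀ e' ∈ dm.getD x [],
              e' ∈ (dm.getD d []).foldl (stepB dm g) (PySem.Set.add s d) := by
            by_cases hxad : x ∈ PySem.Set.add s d
            · have hxd : x = d := by
                rcases (PySem.Set.mem_add s d x).mp hxad with h | h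
                · exact absurd h hxs
                · exact h
              subst hxd
              exact fun e' he' => foldB_seed dm g _ _ e' he'
            · exact fun e' he' => ihf g (by omega) (dm.getD d []) (PySem.Set.add s d)
                (fun y hy => pv_getD_sub_univ dm d y hy) hcnt' x hxt0 hxad e' he'
          exact foldB_mono dm (g + 1) t _ e (hsucc e he)
        · refine ihl _ (fun y hy => hl y (by simp [hy])) ?_ x hx hxt0 e he
          calc pvCnt dm ((dm.getD d []).foldl (stepB dm g) (PySem.Set.add s d))
              ≤ pvCnt dm (PySem.Set.add s d) := pv_cnt_mono dm _ _ ht0sub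
            _ ≤ g := hcnt'
            _ ≤ g + 1 := by omega

-- ----- both walks produce the same sorted closure -----

theorem closure_eq (dm : PySem.Dict String (List String)) (direct : List String)
    (hdir : ∀ d ∈ direct, d ∈ pvUniv dm) :
    PySem.List.sorted
      (bfsA dm
        (direct.length + (dm.values.flatten.length + 1) * (dm.values.flatten.length + 1))
        direct (PySem.Set.ofList direct)) (fun x => x) =
    PySem.List.sorted (closureB dm direct) (fun x => x) := by
  have hvac : ∀ (c : String), c ∈ PySem.Set.ofList direct → c ∉ direct →
      ∀ d ∈ dm.getD c [], d ∈ PySem.Set.ofList direct := by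
    intro c hc hnc
    exact absurd ((PySem.Set.mem_ofList direct c).mp hc) hnc
  have hcnt := pvCnt_le dm (PySem.Set.ofList direct)
  have hAclosed : pvClosed dm (bfsA dm
      (direct.length + (dm.values.flatten.length + 1) * (dm.values.flatten.length + 1))
      direct (PySem.Set.ofList direct)) := by
    apply bfsA_closed dm _ direct _ ?_ hvac
    have : (dm.values.flatten.length + 1) * pvCnt dm (PySem.Set.ofList direct) ≤
        (dm.values.flatten.length + 1) * (dm.values.flatten.length + 1) :=
      Nat.mul_le_mul_left _ (by omega)
    omega
  have hAseed : ∀ y ∈ direct, y ∈ bfsA dm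
      (direct.length + (dm.values.flatten.length + 1) * (dm.values.flatten.length + 1))
      direct (PySem.Set.ofList direct) :=
    fun y hy => bfsA_mono dm _ direct _ y ((PySem.Set.mem_ofList direct y).mpr hy)
  have hemp : ∀ y : String, y ∈ (PySem.Set.empty : PySem.Set String) → False := by
    intro y hy
    simp [PySem.Set.empty] at hy
  have hBclosed : pvClosed dm (closureB dm direct) := by
    intro c hc e he
    refine foldB_closed dm (dm.values.flatten.length + 1) direct PySem.Set.empty hdir ?_
      c hc (fun hy => hemp c hy) e he
    have := pvCnt_le dm (PySem.Set.empty : PySem.Set String)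
    omega
  have hBseed : ∀ d ∈ direct, d ∈ closureB dm direct :=
    fun d hd => foldB_seed dm _ direct _ d hd
  have hiff : ∀ x, x ∈ bfsA dm
      (direct.length + (dm.values.flatten.length + 1) * (dm.values.flatten.length + 1))
      direct (PySem.Set.ofList direct) ↔ x ∈ closureB dm direct := by
    intro x
    constructor
    · intro hx
      refine bfsA_sub dm _ direct _ _ hBclosed ?_ hBseed x hx
      intro y hy
      exact hBseed y ((PySem.Set.mem_ofList direct y).mp hy)
    · intro hx
      refine foldB_sub dm _ hAclosed _ direct _ hAseed ?_ x hx
      intro y hy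
      exact absurd hy (fun h => hemp y h)
  have hperm := (List.perm_ext_iff_of_nodup
      (bfsA_nodup dm _ direct _ (PySem.Set.nodup_ofList direct))
      (foldB_nodup dm _ direct _ (by simp [PySem.Set.empty]))).mpr hiff
  exact (PySem.List.sorted_id_eq_sorted_id_iff_perm _ _).mpr hperm

-- the guarded insertion loop over fresh distinct keys is the filtered map
theorem pv_fold_if_filter {α β : Type} (l : List α) (c : α → Bool) (g : β → α → β) (b : β) :
    l.foldl (fun acc x => if c x then acc else g acc x) b =
    (l.filter (fun x => !(c x))).foldl g b := by
  rw [List.foldl_filter]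
  apply PySem.List.foldl_congr_mem
  intro acc x _
  cases h : c x <;> simp

-- ===== VERDICT (by name: the statement is the Claim_ definition above) =====
theorem merge_drop_map_spec : Claim_equal_merge_drop_map := by
  intro drop_map _
  unfold Spec_merge_drop_map merge_drop_map merge_drop_map_alt
  simp only []
  rw [pv_fold_if_filter]
  have hnodup :
      ((((PySem.Dict.ofList drop_map).items.filter
        (fun p => !(PySem.Set.contains
          (PySem.Set.ofList (PySem.Dict.ofList drop_map).values.flatten) p.1))).map
        (fun p => p.1)).Nodup) := by
    have hkeys : ((PySem.Dict.ofList drop_map).items.map (fun p => p.1)).Nodup := by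
      have := PySem.Dict.nodup_keys_ofList drop_map
      simpa [PySem.Dict.keys] using this
    exact hkeys.sublist (List.Sublist.map _ List.filter_sublist)
  have hfold := PySem.Dict.items_foldl_insert_fresh
      ((PySem.Dict.ofList drop_map).items.filter
        (fun p => !(PySem.Set.contains
          (PySem.Set.ofList (PySem.Dict.ofList drop_map).values.flatten) p.1)))
      (fun p => p.1)
      (fun p => PySem.List.sorted (bfsA (PySem.Dict.ofList drop_map)
        (p.2.length + ((PySem.Dict.ofList drop_map).values.flatten.length + 1) *
          ((PySem.Dict.ofList drop_map).values.flatten.length + 1))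
        p.2 (PySem.Set.ofList p.2)) (fun x => x))
      PySem.Dict.empty (fun p _ => by simp) hnodup
  simp only [] at hfold
  rw [hfold]
  simp only [show (PySem.Dict.empty : PySem.Dict String (List String)).items = [] from rfl, List.nil_append]
  apply List.map_congr_left
  intro p hp
  have hpitems : p ∈ (PySem.Dict.ofList drop_map).items := List.mem_of_mem_filter hp
  have hdir : ∀ d ∈ p.2, d ∈ pvUniv (PySem.Dict.ofList drop_map) := by
    intro d hd
    rw [pvUniv, PySem.Set.mem_ofList, List.mem_flatten]
    refine ⟨p.2, ?_, hd⟩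
    have : p.2 ∈ (PySem.Dict.ofList drop_map).items.map (fun q => q.2) :=
      List.mem_map_of_mem hpitems
    simpa [PySem.Dict.values] using this
  rw [closure_eq _ _ hdir]
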